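/- GENERATED by c/gen_decode.py: decode facts of the image, one per distinct instruction byte string. -/
import UserX.DecodeImage

#decode_all Vorbis.Dec
  "0f28fc"  -- movaps xmm7,xmm4
  "0f848b000000"  -- je 10c338
  "0f8539feffff"  -- jne 10dd59
  "0f8c8d000000"  -- jl 10900d
  "0f94c2"  -- sete dl
  "0fb71b"  -- movzx ebx,WORD PTR [rbx]
  "39f1"  -- cmp ecx,esi
  "410fb65c1d11"  -- movzx ebx,BYTE PTR [r13+rbx*1+0x11]
  "41807c241a00"  -- cmp BYTE PTR [r12+0x1a],0x0
  "41896f10"  -- mov DWORD PTR [r15+0x10],ebp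
  "418b97e8060000"  -- mov edx,DWORD PTR [r15+0x6e8]
  "41d1fd"  -- sar r13d,1
  "440fb67d00"  -- movzx r15d,BYTE PTR [rbp+0x0]
  "443ba5a0000000"  -- cmp r12d,DWORD PTR [rbp+0xa0]
  "44897c2410"  -- mov DWORD PTR [rsp+0x10],r15d
  "448b45bc"  -- mov r8d,DWORD PTR [rbp-0x44]
  "448bbb40080000"  -- mov r15d,DWORD PTR [rbx+0x840]
  "4585c9"  -- test r9d,r9d
  "458b7424ec"  -- mov r14d,DWORD PTR [r12-0x14]
  "48039dc8010000"  -- add rbx,QWORD PTR [rbp+0x1c8]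
  "4863c6"  -- movsxd rax,esi
  "4883c410"  -- add rsp,0x10
  "4889542410"  -- mov QWORD PTR [rsp+0x10],rdx
  "488b0424"  -- mov rax,QWORD PTR [rsp]
  "488b7d88"  -- mov rdi,QWORD PTR [rbp-0x78]
  "488d442430"  -- lea rax,[rsp+0x30]
  "488d7be4"  -- lea rdi,[rbx-0x1c]
  "488db424a0000000"  -- lea rsi,[rsp+0xa0]
  "488dbcdd68040000"  -- lea rdi,[rbp+rbx*8+0x468]
  "48c1e803"  -- shr rax,0x3
  "49035c2408"  -- add rbx,QWORD PTR [r12+0x8]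
  "4983c458"  -- add r12,0x58
  "498d2c1e"  -- lea rbp,[r14+rbx*1]
  "498d7f01"  -- lea rdi,[r15+0x1]
  "49c785c000c00000000000"  -- mov QWORD PTR [r13+0xc000c0],0x0
  "4b8d3c24"  -- lea rdi,[r12+r12*1]
  "4c8943e0"  -- mov QWORD PTR [rbx-0x20],r8
  "4c8b4c2420"  -- mov r9,QWORD PTR [rsp+0x20]
  "4c8d3490"  -- lea r14,[rax+rdx*4]
  "4d63ee"  -- movsxd r13,r14d
  "4e0364fb08"  -- add r12,QWORD PTR [rbx+r15*8+0x8]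
  "660f6ec5"  -- movd xmm0,ebp
  "6641891c24"  -- mov WORD PTR [r12],bx
  "72c9"  -- jb 101220
  "745b"  -- je 10ee11
  "7560"  -- jne 10ef08
  "7c28"  -- jl 111af7
  "7e85"  -- jle 10790d
  "81c3fc070000"  -- add ebx,0x7fc
  "83e001"  -- and eax,0x1
  "89442438"  -- mov DWORD PTR [rsp+0x38],eax
  "8993e4060000"  -- mov DWORD PTR [rbx+0x6e4],edx
  "8b442420"  -- mov eax,DWORD PTR [rsp+0x20]
  "8b7580"  -- mov esi,DWORD PTR [rbp-0x80]
  "8d349d00000000"  -- lea esi,[rbx*4+0x0]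
  "be05000000"  -- mov esi,0x5
  "c685d406000000"  -- mov BYTE PTR [rbp+0x6d4],0x0
  "c783d806000000000000"  -- mov DWORD PTR [rbx+0x6d8],0x0
  "e804a4ffff"  -- call 100640
  "e80de3feff"  -- call 103d00
  "e81871ffff"  -- call 102e60
  "e821f1feff"  -- call 100640
  "e82b97ffff"  -- call 100800
  "e83412ffff"  -- call 100800
  "e83f85ffff"  -- call 104d40
  "e84901ffff"  -- call 103d00
  "e854b4ffff"  -- call 100640
  "e861fcffff"  -- call 100059
  "e86d13ffff"  -- call 100300
  "e878bffeff"  -- call 100640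
  "e8838cffff"  -- call 103f80
  "e88e8effff"  -- call 10d1c0
  "e897d3feff"  -- call 100640
  "e8a1b3ffff"  -- call 100640
  "e8ad7cffff"  -- call 10d1c0
  "e8b66affff"  -- call 100640
  "e8c0faffff"  -- call 107500
  "e8ca13ffff"  -- call 100300
  "e8d4f0ffff"  -- call 100300
  "e8df8effff"  -- call 100800
  "e8e848ffff"  -- call 100720
  "e8eff3feff"  -- call 100300
  "e8fb95ffff"  -- call 100800
  "e929ecffff"  -- jmp 113b22
  "e971ffffff"  -- jmp 10cd44
  "e9ca000000"  -- jmp 116545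
  "eb1f"  -- jmp 1024fb
  "ebb1"  -- jmp 1147bf
  "f20f100db8e20100"  -- movsd xmm1,QWORD PTR [rip+0x1e2b8]
  "f20f5915b3da0100"  -- mulsd xmm2,QWORD PTR [rip+0x1dab3]
  "f30f100424"  -- movss xmm0,DWORD PTR [rsp]
  "f30f106314"  -- movss xmm4,DWORD PTR [rbx+0x14]
  "f30f1143c4"  -- movss DWORD PTR [rbx-0x3c],xmm0
  "f30f1163e8"  -- movss DWORD PTR [rbx-0x18],xmm4
  "f30f5843f4"  -- addss xmm0,DWORD PTR [rbx-0xc]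
  "f30f594d44"  -- mulss xmm1,DWORD PTR [rbp+0x44]
  "f30f5cd0"  -- subss xmm2,xmm0
  "f3410f11442404"  -- movss DWORD PTR [r12+0x4],xmm0
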